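-- pv_equiv track=rewrite | github.com/przemekjoniec/matura | Matury/Matura Grudzien 2024/Rekurencja.py | F
-- ===== SOURCE A (Python) =====
-- def F(x,p, licznik = 0):
--     licznik += 1
--     if x == 0:
--         return 0, licznik
--     else:
--         c = x % p
--         if c % 2 == 1:
--             wynik, licznik = F(x//p,p, licznik)
--             return wynik + c, licznik
--         else:
--             wynik, licznik = F(x//p,p, licznik)
--             return wynik - c, licznik
-- ===== SOURCE B (Python) =====
-- def F(x, p, licznik=0):
--     digits = []
--     while x != 0:
--         digits.append(x % p)
--         x //= p
--     wynik = sum(c if c % 2 == 1 else -c for c in digits)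
--     return wynik, licznik + len(digits) + 1
-- ===== Notes on version B (the rewrite author's own statement) =====
-- stated objective: alternative
-- what changed: Replaces the recursion with two staged passes: first extract the full base-p digit list, then sum the signed digits and compute the call counter in closed form as licznik + len(digits) + 1.
import Mathlib
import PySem

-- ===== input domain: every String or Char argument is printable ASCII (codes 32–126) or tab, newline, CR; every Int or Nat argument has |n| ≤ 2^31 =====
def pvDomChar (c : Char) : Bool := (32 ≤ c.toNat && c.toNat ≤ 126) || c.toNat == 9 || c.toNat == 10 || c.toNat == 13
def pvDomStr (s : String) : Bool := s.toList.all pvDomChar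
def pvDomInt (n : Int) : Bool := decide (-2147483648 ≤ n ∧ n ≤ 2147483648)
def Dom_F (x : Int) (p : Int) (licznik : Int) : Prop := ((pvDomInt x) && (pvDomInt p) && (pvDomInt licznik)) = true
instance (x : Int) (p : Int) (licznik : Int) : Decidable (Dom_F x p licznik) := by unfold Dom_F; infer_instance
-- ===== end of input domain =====

-- B replaces A's recursion by two staged passes: extract the base-p digit list,
-- then sum the signed digits and compute the counter in closed form; same cost.

-- ===== PORT A =====
-- fuel-bounded transliteration of A's recursion; on Pre_F the fuel 2*|x|+2 is
-- never exhausted (proved below via the measure pvM).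
def FgoA : Nat → Int → Int → Int → Int × Int
  | 0, _, _, l => (0, l)
  | fuel+1, x, p, licznik =>
    let licznik := licznik + 1
    if x = 0 then (0, licznik)
    else
      let c := PySem.Int.mod x p
      if PySem.Int.mod c 2 = 1 then
        let r := FgoA fuel (PySem.Int.floordiv x p) p licznik
        (r.1 + c, r.2)
      else
        let r := FgoA fuel (PySem.Int.floordiv x p) p licznik
        (r.1 - c, r.2)

def F (x : Int) (p : Int) (licznik : Int) : Int × Int := FgoA (2 * x.natAbs + 2) x p licznik

-- ===== PORT B =====
-- first pass of Source B: the while loop appending x % p and updating x //= p (fuel-bounded).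
def digitsB : Nat → Int → Int → List Int
  | 0, _, _ => []
  | fuel+1, x, p =>
    if x = 0 then []
    else PySem.Int.mod x p :: digitsB fuel (PySem.Int.floordiv x p) p

-- second pass: wynik = sum(c if c % 2 == 1 else -c for c in digits); counter in closed form.
def F_alt (x : Int) (p : Int) (licznik : Int) : Int × Int :=
  let digits := digitsB (2 * x.natAbs + 2) x p
  ((digits.map (fun c => if PySem.Int.mod c 2 = 1 then c else -c)).sum,
   licznik + digits.length + 1)

-- ===== PRECONDITION & SPEC =====
-- Pre_F excludes exactly the inputs where Python A raises: p = 0 with x ≠ 0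
-- (ZeroDivisionError), and the non-terminating cases (x ≠ 0 with p ∈ {-1,1},
-- or x < 0 with p ≥ 2), which hit RecursionError.
def Pre_F (x : Int) (p : Int) (licznik : Int) : Prop := x = 0 ∨ (0 ≤ x ∧ 2 ≤ p) ∨ p ≤ -2
instance (x : Int) (p : Int) (licznik : Int) : Decidable (Pre_F x p licznik) := by unfold Pre_F; infer_instance
def pvWitness_F : Int × Int × Int := (37, 3, 0)

def Spec_F (x : Int) (p : Int) (licznik : Int) (out : Int × Int) : Prop := out = F_alt x p licznik
instance (x : Int) (p : Int) (licznik : Int) (out : Int × Int) : Decidable (Spec_F x p licznik out) := by unfold Spec_F; infer_instance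

-- ===== CLAIM (what is proved, stated in full; the proofs are below) =====
def Claim_equal_F : Prop := ∀ (x : Int) (p : Int) (licznik : Int), Dom_F x p licznik → Pre_F x p licznik → Spec_F x p licznik (F x p licznik)

-- ===== LEMMAS AND PROOFS =====

-- proof-side: does the digit recursion reach x = 0 within the given fuel?
def pvReach : Nat → Int → Int → Bool
  | 0, _, _ => false
  | fuel+1, x, p => if x = 0 then true else pvReach fuel (PySem.Int.floordiv x p) p

-- termination measure for the Pre_F cases
def pvM (x : Int) : Nat := 2 * x.natAbs + (if 0 < x then 1 else 0)

-- one step of x //= p preserves the Pre_F core and strictly decreases pvM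
theorem pvStep (x p : Int) (h : x = 0 ∨ (0 ≤ x ∧ 2 ≤ p) ∨ p ≤ -2) (hx : x ≠ 0) :
    (PySem.Int.floordiv x p = 0 ∨ (0 ≤ PySem.Int.floordiv x p ∧ 2 ≤ p) ∨ p ≤ -2) ∧
      pvM (PySem.Int.floordiv x p) < pvM x := by
  rcases h with h0 | ⟨hx0, hp⟩ | hp
  · exact absurd h0 hx
  · rw [PySem.Int.floordiv_eq_ediv_of_pos (by omega)]
    have h1 : 0 ≤ x / p := Int.ediv_nonneg hx0 (by omega)
    have h2 : x / p < x := by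
      have hm : x / p * p ≤ x := Int.ediv_mul_le x (by omega)
      have hm2 : x / p * 2 ≤ x / p * p := by nlinarith
      omega
    exact ⟨Or.inr (Or.inl ⟨h1, hp⟩), by unfold pvM; split_ifs <;> omega⟩
  · have heq := PySem.Int.floordiv_mul_add_mod x p
    have hb := PySem.Int.mod_neg_bounds (a := x) (show p < 0 by omega)
    set y := PySem.Int.floordiv x p with hy
    set r := PySem.Int.mod x p with hr
    refine ⟨Or.inr (Or.inr hp), ?_⟩
    by_cases hxpos : 0 < x
    · have hy0 : y < 0 := by nlinarith
      have hyx : -y ≤ x := by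
        nlinarith [mul_nonneg (show (0:Int) ≤ -(p + 2) by omega) (show (0:Int) ≤ -(y + 1) by omega)]
      unfold pvM; split_ifs <;> omega
    · have hxneg : x < 0 := by omega
      have hy0 : 0 ≤ y := by
        by_contra hneg
        nlinarith [mul_nonneg (show (0:Int) ≤ -(p + 2) by omega) (show (0:Int) ≤ -(y + 1) by omega)]
      have hyx : 2 * y ≤ -x := by nlinarith
      unfold pvM; split_ifs <;> omega

theorem pvReach_true : ∀ (n : Nat) (x p : Int), (x = 0 ∨ (0 ≤ x ∧ 2 ≤ p) ∨ p ≤ -2) →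
    pvM x < n → pvReach n x p = true := by
  intro n
  induction n with
  | zero => intro x p _ h; exact absurd h (by omega)
  | succ m ih =>
    intro x p hpre hlt
    by_cases hx : x = 0
    · simp [pvReach, hx]
    · obtain ⟨hpre', hdec⟩ := pvStep x p hpre hx
      simp only [pvReach, if_neg hx]
      exact ih _ _ hpre' (by omega)

-- A's recursion computed from the digit list: signed digit sum, counter = length (+1 iff 0 was reached)
theorem pvMaster (fuel : Nat) : ∀ (x p l : Int),
    FgoA fuel x p l =
      (((digitsB fuel x p).map (fun c => if PySem.Int.mod c 2 = 1 then c else -c)).sum,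
        l + (digitsB fuel x p).length + (if pvReach fuel x p then 1 else 0)) := by
  induction fuel with
  | zero => intro x p l; simp [FgoA, digitsB, pvReach]
  | succ m ih =>
    intro x p l
    simp only [FgoA, digitsB, pvReach]
    by_cases hx : x = 0
    · simp [hx]
    · simp only [if_neg hx, ih, List.map_cons, List.sum_cons, List.length_cons]
      split_ifs <;> simp only [Prod.mk.injEq] <;> exact ⟨by ring, by push_cast; ring⟩

-- ===== VERDICT (by name: the statement is the Claim_ definition above) =====
theorem F_spec : Claim_equal_F := by
  intro x p l _ hpre
  show F x p l = F_alt x p l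
  have hreach : pvReach (2 * x.natAbs + 2) x p = true := by
    apply pvReach_true _ _ _ hpre
    unfold pvM; split_ifs <;> omega
  simp [F, F_alt, pvMaster, hreach]
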